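-- pv_equiv track=rewrite | github.com/cyndereN/Python-Learning | PyShell/test/test_shell.py | count_max_redirection
-- ===== SOURCE A (Python) =====
-- def count_max_redirection(cmd):
--     commands = cmd.split(";")
--     calls = []
--     for command in commands:
--         calls.extend(command.split("|"))
--     num_of_redirection = 0
--     for call in calls:
--         if (
--             call.count(">") > num_of_redirection
--             or call.count("<") > num_of_redirection
--         ):
--             num_of_redirection = max(call.count(">"), call.count("<"))
--     return num_of_redirection
-- ===== SOURCE B (Python) =====
-- def count_max_redirection(cmd):
--     best = 0
--     cur_gt = 0
--     cur_lt = 0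
--     for ch in cmd:
--         if ch == ";" or ch == "|":
--             cur_gt = 0
--             cur_lt = 0
--         elif ch == ">":
--             cur_gt += 1
--             if cur_gt > best:
--                 best = cur_gt
--         elif ch == "<":
--             cur_lt += 1
--             if cur_lt > best:
--                 best = cur_lt
--     return best
-- ===== Notes on version B (the rewrite author's own statement) =====
-- stated objective: alternative
-- what changed: Replaced the two-level split into segment lists with a per-segment count() rescan by a single character-by-character state machine keeping two running counters and a global best, with no intermediate lists.
import Mathlib
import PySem

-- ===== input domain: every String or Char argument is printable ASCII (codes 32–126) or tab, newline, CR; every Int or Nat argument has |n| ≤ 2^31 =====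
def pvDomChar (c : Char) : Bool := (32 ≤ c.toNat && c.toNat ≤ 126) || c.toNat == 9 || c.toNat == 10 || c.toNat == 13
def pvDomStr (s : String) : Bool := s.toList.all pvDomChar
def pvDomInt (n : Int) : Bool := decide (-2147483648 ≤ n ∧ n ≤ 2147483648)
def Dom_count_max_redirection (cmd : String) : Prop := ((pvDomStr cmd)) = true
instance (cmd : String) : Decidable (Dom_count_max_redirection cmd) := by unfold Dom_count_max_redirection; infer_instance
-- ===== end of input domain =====

-- B replaces the split-then-recount-each-segment approach by a single-pass
-- character state machine (two running counters + a global best, no intermediate lists); objective: alternative.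


-- ===== PORT A =====
def count_max_redirection (cmd : String) : Int :=
  let commands := PySem.Chars.splitOn cmd.toList [';']
  let calls := commands.foldl (fun calls command => calls ++ PySem.Chars.splitOn command ['|']) []
  calls.foldl
    (fun num call =>
      if (PySem.Chars.count call ['>'] : Int) > num ∨ (PySem.Chars.count call ['<'] : Int) > num then
        max (PySem.Chars.count call ['>'] : Int) (PySem.Chars.count call ['<'] : Int)
      else num)
    0

-- ===== PORT B =====
-- single pass over the characters: reset the counters at a separator, bump the matching counter and the best otherwise
def scanRed : List Char → Int → Int → Int → Int
  | [], _, _, best => best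
  | ch :: rest, cur_gt, cur_lt, best =>
    if ch = ';' ∨ ch = '|' then scanRed rest 0 0 best
    else if ch = '>' then
      scanRed rest (cur_gt + 1) cur_lt (if cur_gt + 1 > best then cur_gt + 1 else best)
    else if ch = '<' then
      scanRed rest cur_gt (cur_lt + 1) (if cur_lt + 1 > best then cur_lt + 1 else best)
    else scanRed rest cur_gt cur_lt best

def count_max_redirection_alt (cmd : String) : Int :=
  scanRed cmd.toList 0 0 0

-- ===== PRECONDITION & SPEC =====
def Spec_count_max_redirection (cmd : String) (out : Int) : Prop := out = count_max_redirection_alt cmd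
instance (cmd : String) (out : Int) : Decidable (Spec_count_max_redirection cmd out) := by unfold Spec_count_max_redirection; infer_instance

-- ===== CLAIM (what is proved, stated in full; the proofs are below) =====
def Claim_equal_count_max_redirection : Prop := ∀ (cmd : String), Dom_count_max_redirection cmd → Spec_count_max_redirection cmd (count_max_redirection cmd)

-- ===== LEMMAS AND PROOFS =====

-- splitting a char list at every separator satisfying p (structural version of repeated single-char split)
def segsBy (p : Char → Bool) : List Char → List (List Char)
  | [] => [[]]
  | d :: rest =>
    if p d then [] :: segsBy p rest
    else
      match segsBy p rest with
      | [] => [[d]]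
      | s0 :: r => (d :: s0) :: r

lemma segsBy_ne_nil (p : Char → Bool) (l : List Char) : segsBy p l ≠ [] := by
  cases l with
  | nil => simp [segsBy]
  | cons d rest =>
    simp only [segsBy]
    split
    · simp
    · cases h : segsBy p rest <;> simp

-- PySem.Chars.count with a single-character needle is countP
lemma count_go_single (c : Char) :
    ∀ (s : List Char) (fuel acc : Nat), s.length ≤ fuel →
      PySem.Chars.count.go [c] fuel s acc = acc + s.countP (· == c) := by
  intro s
  induction s with
  | nil => intro fuel acc _; cases fuel <;> simp [PySem.Chars.count.go]
  | cons d t ih =>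
    intro fuel acc h
    cases fuel with
    | zero => simp at h
    | succ f =>
      simp only [List.length_cons, Nat.add_le_add_iff_right] at h
      simp only [PySem.Chars.count.go, List.isPrefixOf, List.countP_cons]
      by_cases hd : c = d
      · subst hd
        simp only [beq_self_eq_true, Bool.true_and, if_true, List.length_singleton,
          List.drop_succ_cons, List.drop_zero, ih f (acc + 1) h]
        omega
      · have h1 : (c == d) = false := by simpa using hd
        have h2 : (d == c) = false := by simpa using Ne.symm hd
        simp only [h1, h2, Bool.false_and, Bool.false_eq_true, if_false, ih f acc h]
        simp

lemma count_single (c : Char) (s : List Char) :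
    PySem.Chars.count s [c] = s.countP (· == c) := by
  simp only [PySem.Chars.count, List.isEmpty_cons, Bool.false_eq_true, if_false,
    count_go_single c s s.length 0 le_rfl, Nat.zero_add]

-- PySem.Chars.splitOn with a single-character separator is segsBy
lemma splitOn_go_single (c : Char) :
    ∀ (s : List Char) (fuel : Nat) (cur : List Char) (acc : List (List Char)), s.length ≤ fuel →
      PySem.Chars.splitOn.go [c] fuel s cur acc =
        acc.reverse ++
          (match segsBy (· == c) s with
           | [] => [cur.reverse]
           | s0 :: r => (cur.reverse ++ s0) :: r) := by
  intro s
  induction s with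
  | nil =>
    intro fuel cur acc _
    cases fuel <;> simp [PySem.Chars.splitOn.go, segsBy]
  | cons d t ih =>
    intro fuel cur acc h
    cases fuel with
    | zero => simp at h
    | succ f =>
      simp only [List.length_cons, Nat.add_le_add_iff_right] at h
      simp only [PySem.Chars.splitOn.go, List.isPrefixOf, segsBy]
      by_cases hd : c = d
      · subst hd
        simp only [beq_self_eq_true, Bool.true_and, if_true,
          List.length_singleton, List.drop_succ_cons, List.drop_zero,
          ih f [] (cur.reverse :: acc) h]
        cases hseg : segsBy (· == c) t with
        | nil => exact absurd hseg (segsBy_ne_nil _ _)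
        | cons s0 r => simp
      · have h1 : (c == d) = false := by simpa using hd
        have h2 : (d == c) = false := by simpa using Ne.symm hd
        simp only [h1, h2, Bool.false_and, Bool.false_eq_true, if_false,
          ih f (d :: cur) acc h]
        cases hseg : segsBy (· == c) t with
        | nil => exact absurd hseg (segsBy_ne_nil _ _)
        | cons s0 r => simp

lemma splitOn_single (c : Char) (s : List Char) :
    PySem.Chars.splitOn s [c] = segsBy (· == c) s := by
  rw [PySem.Chars.splitOn, splitOn_go_single c s (s.length + 1) [] [] (Nat.le_succ _)]
  cases hseg : segsBy (· == c) s with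
  | nil => exact absurd hseg (segsBy_ne_nil _ _)
  | cons s0 r => simp

-- splitting twice is splitting on the union predicate
lemma segsBy_flatMap (p q : Char → Bool) (s : List Char) :
    (segsBy p s).flatMap (segsBy q) = segsBy (fun d => p d || q d) s := by
  induction s with
  | nil => simp [segsBy]
  | cons d t ih =>
    simp only [segsBy]
    by_cases hp : p d
    · simp [hp, segsBy, ih]
    · cases hseg : segsBy p t with
      | nil => exact absurd hseg (segsBy_ne_nil _ _)
      | cons s0 r =>
        rw [hseg] at ih
        by_cases hq : q d
        · simp only [hp, hq, Bool.false_eq_true, if_false, Bool.false_or, if_true,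
            List.flatMap_cons, segsBy]
          rw [← ih]
          simp [List.flatMap_cons]
        · simp only [hp, hq, Bool.false_eq_true, if_false, Bool.false_or,
            List.flatMap_cons, segsBy]
          cases hsq : segsBy q s0 with
          | nil => exact absurd hsq (segsBy_ne_nil _ _)
          | cons u0 ur =>
            rw [← ih]
            simp [List.flatMap_cons, hsq]

-- the maximum-tracking fold of A over a list of segments
def segMax : List (List Char) → Int → Int
  | [], b => b
  | s :: r, b => segMax r (max b (max (s.countP (· == '>') : Int) (s.countP (· == '<') : Int)))

lemma foldA_eq_segMax (calls : List (List Char)) :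
    ∀ n : Int,
      calls.foldl
        (fun num call =>
          if (PySem.Chars.count call ['>'] : Int) > num ∨ (PySem.Chars.count call ['<'] : Int) > num then
            max (PySem.Chars.count call ['>'] : Int) (PySem.Chars.count call ['<'] : Int)
          else num) n = segMax calls n := by
  induction calls with
  | nil => intro n; simp [segMax]
  | cons call r ih =>
    intro n
    simp only [List.foldl_cons, segMax]
    rw [ih]
    simp only [count_single]
    congr 1
    rcases le_or_gt ((call.countP (· == '>') : Int)) n with h1 | h1 <;>
      rcases le_or_gt ((call.countP (· == '<') : Int)) n with h2 | h2 <;>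
      simp only [gt_iff_lt] <;> split_ifs with h <;> omega

-- the scan invariant: scanRed = segMax over the remaining segments, first segment offset by the running counters
lemma scanRed_spec (s : List Char) :
    ∀ (g l b : Int), 0 ≤ g → 0 ≤ l → g ≤ b → l ≤ b →
      scanRed s g l b =
        (match segsBy (fun d => d == ';' || d == '|') s with
         | [] => b
         | s0 :: r => segMax r (max b (max (g + (s0.countP (· == '>') : Int)) (l + (s0.countP (· == '<') : Int))))) := by
  induction s with
  | nil =>
    intro g l b _ _ hg hl
    simp only [scanRed, segsBy, List.countP_nil, Nat.cast_zero, Int.add_zero, segMax,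
      max_def]
    split_ifs <;> omega
  | cons d t ih =>
    intro g l b hg0 hl0 hg hl
    cases hseg : segsBy (fun d => d == ';' || d == '|') t with
    | nil => exact absurd hseg (segsBy_ne_nil _ _)
    | cons s0 r =>
      have hcg : (0 : Int) ≤ (s0.countP (· == '>') : Int) := Int.natCast_nonneg _
      have hcl : (0 : Int) ≤ (s0.countP (· == '<') : Int) := Int.natCast_nonneg _
      by_cases hsep : d = ';' ∨ d = '|'
      · have hpd : (d == ';' || d == '|') = true := by
          rcases hsep with h | h <;> simp [h]
        simp only [scanRed, if_pos hsep, segsBy, hpd, if_true, hseg, List.countP_nil,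
          Nat.cast_zero, Int.add_zero, segMax]
        rw [ih 0 0 b le_rfl le_rfl (by omega) (by omega), hseg]
        simp only [Int.zero_add]
        congr 1
        simp only [max_def]
        split_ifs <;> omega
      · have hpd : (d == ';' || d == '|') = false := by
          simp only [Bool.or_eq_false_iff, beq_eq_false_iff_ne]
          exact ⟨fun h => hsep (Or.inl h), fun h => hsep (Or.inr h)⟩
        by_cases hgt : d = '>'
        · subst hgt
          simp only [scanRed, if_neg hsep, segsBy, hpd, Bool.false_eq_true,
            if_false, hseg, List.countP_cons, beq_self_eq_true, if_true]
          have hb' : (if g + 1 > b then g + 1 else b) = max b (g + 1) := by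
            simp only [max_def]; split_ifs <;> omega
          rw [hb', ih (g + 1) l (max b (g + 1)) (by omega) hl0 (by omega) (by omega), hseg]
          have h1 : ('>' == '<') = false := by decide
          simp only [h1, Bool.false_eq_true, if_false, Nat.add_zero]
          congr 1
          push_cast
          simp only [max_def]
          split_ifs <;> omega
        · by_cases hlt : d = '<'
          · subst hlt
            simp only [scanRed, if_neg hsep, if_neg (by decide : ¬('<' : Char) = '>'),
              segsBy, hpd, Bool.false_eq_true, if_false, hseg,
              List.countP_cons, beq_self_eq_true, if_true]
            have hb' : (if l + 1 > b then l + 1 else b) = max b (l + 1) := by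
              simp only [max_def]; split_ifs <;> omega
            rw [hb', ih g (l + 1) (max b (l + 1)) hg0 (by omega) (by omega) (by omega), hseg]
            have h1 : ('<' == '>') = false := by decide
            simp only [h1, Bool.false_eq_true, if_false, Nat.add_zero]
            congr 1
            push_cast
            simp only [max_def]
            split_ifs <;> omega
          · have h1 : (d == '>') = false := by simpa using hgt
            have h2 : (d == '<') = false := by simpa using hlt
            simp only [scanRed, if_neg hsep, if_neg hgt, if_neg hlt, segsBy, hpd,
              Bool.false_eq_true, if_false, hseg, List.countP_cons, h1, h2,
              Nat.add_zero]
            rw [ih g l b hg0 hl0 hg hl, hseg]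

-- ===== VERDICT (by name: the statement is the Claim_ definition above) =====
theorem count_max_redirection_spec : Claim_equal_count_max_redirection := by
  intro cmd _
  unfold Spec_count_max_redirection count_max_redirection count_max_redirection_alt
  simp only [PySem.List.foldl_append_eq_flatMap, List.nil_append, splitOn_single,
    segsBy_flatMap, foldA_eq_segMax]
  rw [scanRed_spec cmd.toList 0 0 0 le_rfl le_rfl le_rfl le_rfl]
  cases hseg : segsBy (fun d => (d == ';') || (d == '|')) cmd.toList with
  | nil => exact absurd hseg (segsBy_ne_nil _ _)
  | cons s0 r =>
    simp only [segMax, Int.zero_add]
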